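-- pv_equiv track=rewrite | github.com/xujian519/athena-platform | tools/deployment/deploy_iterative_search.py | _rerank_for_diversity
-- ===== SOURCE A (Python) =====
-- from typing import Any, Dict, List, Optional
--
-- def _rerank_for_diversity(results: List[Dict]) -> List[Dict]:
--     """为多样性重新排序"""
--     # 简单的多样性重排序：交替不同来源的专利
--     sources = ['CNIPA', 'USPTO', 'EPO', 'WIPO']
--     source_groups = {source: [] for source in sources}
--
--     for result in results:
--         source = result.get('source')
--         if source in source_groups:
--             source_groups[source].append(result)
--         else:
--             source_groups['USPTO'].append(result)
--
--     # 交替选择不同来源的结果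
--     reranked = []
--     for _ in range(len(results)):
--         for source in sources:
--             if source_groups[source]:
--                 reranked.append(source_groups[source].pop(0))
--
--     return reranked
-- ===== SOURCE B (Python) =====
-- def _rerank_for_diversity(results):
--     """为多样性重新排序 (single-pass bucketing + index-pointer round-robin)"""
--     cn, us, ep, wi = [], [], [], []
--     for r in results:
--         s = r.get('source')
--         if s == 'CNIPA':
--             cn.append(r)
--         elif s == 'EPO':
--             ep.append(r)
--         elif s == 'WIPO':
--             wi.append(r)
--         else:
--             us.append(r)
--     out = []
--     for i in range(max(len(cn), len(us), len(ep), len(wi))):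
--         if i < len(cn):
--             out.append(cn[i])
--         if i < len(us):
--             out.append(us[i])
--         if i < len(ep):
--             out.append(ep[i])
--         if i < len(wi):
--             out.append(wi[i])
--     return out
-- ===== Notes on version B (the rewrite author's own statement) =====
-- stated objective: alternative
-- what changed: Instead of repeatedly scanning the four source groups and pop(0)-shifting list heads for len(results) rounds, B buckets results into four lists in one pass and emits the round-robin interleave by walking an index pointer over range(max bucket length), never mutating the buckets.
import Mathlib
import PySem

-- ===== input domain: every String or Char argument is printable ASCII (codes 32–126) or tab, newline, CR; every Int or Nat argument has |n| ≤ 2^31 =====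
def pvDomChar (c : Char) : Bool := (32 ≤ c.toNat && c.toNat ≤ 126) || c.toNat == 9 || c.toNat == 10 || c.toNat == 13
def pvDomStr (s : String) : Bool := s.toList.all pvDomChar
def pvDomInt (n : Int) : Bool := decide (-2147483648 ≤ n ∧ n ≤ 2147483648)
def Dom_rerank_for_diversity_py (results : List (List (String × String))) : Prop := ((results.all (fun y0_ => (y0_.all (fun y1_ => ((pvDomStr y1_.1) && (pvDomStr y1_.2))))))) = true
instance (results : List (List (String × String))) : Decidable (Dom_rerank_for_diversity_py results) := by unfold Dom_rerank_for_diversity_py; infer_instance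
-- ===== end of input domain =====

-- B buckets by source in one pass into four lists and emits the round-robin interleave with an
-- index pointer, instead of A's per-round dict scans with pop(0); same output, different algorithm.

-- ===== PORT A =====
def rerank_for_diversity_py (results : List (List (String × String))) : List (List (String × String)) :=
  let sources : List String := ["CNIPA", "USPTO", "EPO", "WIPO"]
  let source_groups : PySem.Dict String (List (List (String × String))) :=
    sources.foldl (fun d s => d.insert s []) PySem.Dict.empty
  let source_groups :=
    results.foldl (fun d result =>
      match (PySem.Dict.mk result).get? "source" with
      | some s =>
          if d.contains s then d.modify s [] (fun l => l ++ [result])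
          else d.modify "USPTO" [] (fun l => l ++ [result])
      | none => d.modify "USPTO" [] (fun l => l ++ [result])) source_groups
  let st :=
    (List.range results.length).foldl
      (fun (st : List (List (String × String)) × PySem.Dict String (List (List (String × String)))) _ =>
        sources.foldl (fun st s =>
          match st.2.getD s [] with
          | [] => st
          | x :: xs => (st.1 ++ [x], st.2.insert s xs)) st)
      ([], source_groups)
  st.1

-- ===== PORT B =====
def rerank_for_diversity_py_alt (results : List (List (String × String))) : List (List (String × String)) :=
  let bs :=
    results.foldl
      (fun (b : List (List (String × String)) × List (List (String × String)) ×
               List (List (String × String)) × List (List (String × String))) r =>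
        let s := (PySem.Dict.mk r).get? "source"
        if s = some "CNIPA" then (b.1 ++ [r], b.2.1, b.2.2.1, b.2.2.2)
        else if s = some "EPO" then (b.1, b.2.1, b.2.2.1 ++ [r], b.2.2.2)
        else if s = some "WIPO" then (b.1, b.2.1, b.2.2.1, b.2.2.2 ++ [r])
        else (b.1, b.2.1 ++ [r], b.2.2.1, b.2.2.2))
      ([], [], [], [])
  let cn := bs.1; let us := bs.2.1; let ep := bs.2.2.1; let wi := bs.2.2.2
  (List.range (max (max (max cn.length us.length) ep.length) wi.length)).foldl
    (fun out i =>
      let out := if i < cn.length then out ++ [cn.getD i []] else out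
      let out := if i < us.length then out ++ [us.getD i []] else out
      let out := if i < ep.length then out ++ [ep.getD i []] else out
      let out := if i < wi.length then out ++ [wi.getD i []] else out
      out)
    []

-- ===== PRECONDITION & SPEC =====
def Spec_rerank_for_diversity_py (results : List (List (String × String))) (out : List (List (String × String))) : Prop := out = rerank_for_diversity_py_alt results
instance (results : List (List (String × String))) (out : List (List (String × String))) : Decidable (Spec_rerank_for_diversity_py results out) := by unfold Spec_rerank_for_diversity_py; infer_instance

-- ===== CLAIM (what is proved, stated in full; the proofs are below) =====
def Claim_equal_rerank_for_diversity_py : Prop := ∀ (results : List (List (String × String))), Dom_rerank_for_diversity_py results → Spec_rerank_for_diversity_py results (rerank_for_diversity_py results)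


-- ===== LEMMAS AND PROOFS =====

abbrev PvR : Type := List (String × String)

-- the four-bucket dict state A maintains
def pvDictOf (a b c d : List PvR) : PySem.Dict String (List PvR) :=
  PySem.Dict.mk [("CNIPA", a), ("USPTO", b), ("EPO", c), ("WIPO", d)]

-- B's bucketing step (copy of the lambda in the port of B)
def pvStepB (b : List PvR × List PvR × List PvR × List PvR) (r : PvR) :
    List PvR × List PvR × List PvR × List PvR :=
  let s := (PySem.Dict.mk r).get? "source"
  if s = some "CNIPA" then (b.1 ++ [r], b.2.1, b.2.2.1, b.2.2.2)
  else if s = some "EPO" then (b.1, b.2.1, b.2.2.1 ++ [r], b.2.2.2)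
  else if s = some "WIPO" then (b.1, b.2.1, b.2.2.1, b.2.2.2 ++ [r])
  else (b.1, b.2.1 ++ [r], b.2.2.1, b.2.2.2)

-- A's bucketing step (copy of the lambda in the port of A)
def pvStepA (d : PySem.Dict String (List PvR)) (result : PvR) : PySem.Dict String (List PvR) :=
  match (PySem.Dict.mk result).get? "source" with
  | some s =>
      if d.contains s then d.modify s [] (fun l => l ++ [result])
      else d.modify "USPTO" [] (fun l => l ++ [result])
  | none => d.modify "USPTO" [] (fun l => l ++ [result])

-- A's inner round (one pass over the four sources)
def pvRoundA (st : List PvR × PySem.Dict String (List PvR)) : List PvR × PySem.Dict String (List PvR) :=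
  ["CNIPA", "USPTO", "EPO", "WIPO"].foldl (fun st s =>
    match st.2.getD s [] with
    | [] => st
    | x :: xs => (st.1 ++ [x], st.2.insert s xs)) st

-- B's round at index i
def pvRoundB (cn us ep wi : List PvR) (out : List PvR) (i : Nat) : List PvR :=
  let out := if i < cn.length then out ++ [cn.getD i []] else out
  let out := if i < us.length then out ++ [us.getD i []] else out
  let out := if i < ep.length then out ++ [ep.getD i []] else out
  let out := if i < wi.length then out ++ [wi.getD i []] else out
  out

-- the canonical round-robin: n rounds, each taking the heads of the four lists
def pvRR : Nat → List PvR → List PvR → List PvR → List PvR → List PvR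
  | 0, _, _, _, _ => []
  | n + 1, a, b, c, d =>
      (a.take 1 ++ b.take 1 ++ c.take 1 ++ d.take 1) ++ pvRR n a.tail b.tail c.tail d.tail

lemma pvStepA_eq (a b c d : List PvR) (r : PvR) :
    pvStepA (pvDictOf a b c d) r =
      pvDictOf (pvStepB (a, b, c, d) r).1 (pvStepB (a, b, c, d) r).2.1
        (pvStepB (a, b, c, d) r).2.2.1 (pvStepB (a, b, c, d) r).2.2.2 := by
  unfold pvStepA pvStepB pvDictOf
  rcases h : (PySem.Dict.mk r).get? "source" with _ | s
  · simp [PySem.Dict.modify, PySem.Dict.contains, PySem.Dict.get?, PySem.Dict.getD, PySem.Dict.insert]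
  · by_cases h1 : s = "CNIPA"
    · subst h1
      simp [PySem.Dict.modify, PySem.Dict.contains, PySem.Dict.get?, PySem.Dict.getD, PySem.Dict.insert]
    · by_cases h2 : s = "USPTO"
      · subst h2
        simp [PySem.Dict.modify, PySem.Dict.contains, PySem.Dict.get?, PySem.Dict.getD, PySem.Dict.insert]
      · by_cases h3 : s = "EPO"
        · subst h3
          simp [PySem.Dict.modify, PySem.Dict.contains, PySem.Dict.get?, PySem.Dict.getD, PySem.Dict.insert]
        · by_cases h4 : s = "WIPO"
          · subst h4
            simp [PySem.Dict.modify, PySem.Dict.contains, PySem.Dict.get?, PySem.Dict.getD, PySem.Dict.insert]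
          · have h1' : ¬("CNIPA" = s) := fun h => h1 h.symm
            have h2' : ¬("USPTO" = s) := fun h => h2 h.symm
            have h3' : ¬("EPO" = s) := fun h => h3 h.symm
            have h4' : ¬("WIPO" = s) := fun h => h4 h.symm
            simp [PySem.Dict.modify, PySem.Dict.contains, PySem.Dict.get?, PySem.Dict.getD, PySem.Dict.insert, h1, h2, h3, h4, h1', h2', h3', h4']

lemma pvBuckets_eq (results : List PvR) : ∀ (a b c d : List PvR),
    results.foldl pvStepA (pvDictOf a b c d) =
      pvDictOf (results.foldl pvStepB (a, b, c, d)).1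
        (results.foldl pvStepB (a, b, c, d)).2.1
        (results.foldl pvStepB (a, b, c, d)).2.2.1
        (results.foldl pvStepB (a, b, c, d)).2.2.2 := by
  induction results with
  | nil => intro a b c d; rfl
  | cons r rs ih =>
      intro a b c d
      simp only [List.foldl_cons, pvStepA_eq]
      rw [ih]

lemma pvRoundA_eq (acc : List PvR) (a b c d : List PvR) :
    pvRoundA (acc, pvDictOf a b c d) =
      (acc ++ (a.take 1 ++ b.take 1 ++ c.take 1 ++ d.take 1),
        pvDictOf a.tail b.tail c.tail d.tail) := by
  rcases a with _ | ⟨x, xs⟩ <;> rcases b with _ | ⟨y, ys⟩ <;>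
    rcases c with _ | ⟨z, zs⟩ <;> rcases d with _ | ⟨w, ws⟩ <;>
    simp [pvRoundA, pvDictOf, PySem.Dict.getD, PySem.Dict.get?, PySem.Dict.insert, List.foldl]

lemma pvRoundsA (n : Nat) : ∀ (acc : List PvR) (a b c d : List PvR),
    (List.range n).foldl (fun st _ => pvRoundA st) (acc, pvDictOf a b c d) =
      (acc ++ pvRR n a b c d, pvDictOf (a.drop n) (b.drop n) (c.drop n) (d.drop n)) := by
  induction n with
  | zero => intro acc a b c d; simp [pvRR]
  | succ n ih =>
      intro acc a b c d
      rw [List.range_succ_eq_map]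
      simp only [List.foldl_cons, List.foldl_map, pvRoundA_eq, ih, pvRR]
      refine Prod.ext ?_ ?_
      · simp
      · simp

lemma pvRoundB_shift (l : List PvR) (out : List PvR) (i : Nat) :
    (if i + 1 < l.length then out ++ [l.getD (i + 1) []] else out) =
      (if i < l.tail.length then out ++ [l.tail.getD i []] else out) := by
  rcases l with _ | ⟨x, xs⟩ <;> simp

lemma pvRoundsB (m : Nat) : ∀ (acc : List PvR) (a b c d : List PvR),
    (List.range m).foldl (pvRoundB a b c d) acc = acc ++ pvRR m a b c d := by
  induction m with
  | zero => intro acc a b c d; simp [pvRR]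
  | succ m ih =>
      intro acc a b c d
      rw [List.range_succ_eq_map]
      simp only [List.foldl_cons, List.foldl_map]
      have hfun : (fun (out : List PvR) (i : Nat) => pvRoundB a b c d out (i + 1)) =
          pvRoundB a.tail b.tail c.tail d.tail := by
        funext out i
        unfold pvRoundB
        simp only []
        rw [pvRoundB_shift a, pvRoundB_shift b, pvRoundB_shift c, pvRoundB_shift d]
      rw [hfun, ih]
      have h0 : pvRoundB a b c d acc 0 = acc ++ (a.take 1 ++ b.take 1 ++ c.take 1 ++ d.take 1) := by
        rcases a with _ | ⟨x, xs⟩ <;> rcases b with _ | ⟨y, ys⟩ <;>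
          rcases c with _ | ⟨z, zs⟩ <;> rcases d with _ | ⟨w, ws⟩ <;> simp [pvRoundB]
      rw [h0, show pvRR (m + 1) a b c d =
        (a.take 1 ++ b.take 1 ++ c.take 1 ++ d.take 1) ++ pvRR m a.tail b.tail c.tail d.tail from rfl]
      simp

lemma pvRR_stable (n : Nat) : ∀ (a b c d : List PvR),
    a.length ≤ n → b.length ≤ n → c.length ≤ n → d.length ≤ n →
      pvRR (n + 1) a b c d = pvRR n a b c d := by
  induction n with
  | zero =>
      intro a b c d ha hb hc hd
      rw [List.length_eq_zero_iff.1 (Nat.le_zero.1 ha), List.length_eq_zero_iff.1 (Nat.le_zero.1 hb),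
        List.length_eq_zero_iff.1 (Nat.le_zero.1 hc), List.length_eq_zero_iff.1 (Nat.le_zero.1 hd)]
      rfl
  | succ n ih =>
      intro a b c d ha hb hc hd
      show _ ++ pvRR (n + 1) a.tail b.tail c.tail d.tail = _ ++ pvRR n a.tail b.tail c.tail d.tail
      rw [ih a.tail b.tail c.tail d.tail (by simp [List.length_tail]; omega)
        (by simp [List.length_tail]; omega) (by simp [List.length_tail]; omega)
        (by simp [List.length_tail]; omega)]

lemma pvRR_of_ge (a b c d : List PvR)
    (m : Nat) (hm : m = max (max (max a.length b.length) c.length) d.length) :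
    ∀ n, m ≤ n → pvRR n a b c d = pvRR m a b c d := by
  intro n
  induction n with
  | zero => intro h; rw [Nat.le_zero.1 h]
  | succ n ih =>
      intro h
      rcases Nat.eq_or_lt_of_le h with h' | h'
      · rw [h']
      · have hn : m ≤ n := by omega
        rw [pvRR_stable n a b c d (by omega) (by omega) (by omega) (by omega), ih hn]

lemma pvBuckets_length (results : List PvR) : ∀ (st : List PvR × List PvR × List PvR × List PvR),
    (results.foldl pvStepB st).1.length + (results.foldl pvStepB st).2.1.length +
      (results.foldl pvStepB st).2.2.1.length + (results.foldl pvStepB st).2.2.2.length =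
      st.1.length + st.2.1.length + st.2.2.1.length + st.2.2.2.length + results.length := by
  induction results with
  | nil => intro st; simp
  | cons r rs ih =>
      intro st
      simp only [List.foldl_cons, ih]
      simp only [pvStepB]
      split_ifs <;> simp <;> omega

def pvBk (results : List PvR) : List PvR × List PvR × List PvR × List PvR :=
  results.foldl pvStepB ([], [], [], [])

lemma portA_eq (results : List PvR) :
    rerank_for_diversity_py results =
      pvRR results.length (pvBk results).1 (pvBk results).2.1 (pvBk results).2.2.1
        (pvBk results).2.2.2 := by
  show ((List.range results.length).foldl (fun st _ => pvRoundA st)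
      ([], results.foldl pvStepA (pvDictOf [] [] [] []))).1 = _
  rw [pvBuckets_eq, pvRoundsA]
  rfl

lemma portB_eq (results : List PvR) :
    rerank_for_diversity_py_alt results =
      pvRR (max (max (max (pvBk results).1.length (pvBk results).2.1.length)
          (pvBk results).2.2.1.length) (pvBk results).2.2.2.length)
        (pvBk results).1 (pvBk results).2.1 (pvBk results).2.2.1 (pvBk results).2.2.2 := by
  show (List.range (max (max (max (pvBk results).1.length (pvBk results).2.1.length)
          (pvBk results).2.2.1.length) (pvBk results).2.2.2.length)).foldl
      (pvRoundB (pvBk results).1 (pvBk results).2.1 (pvBk results).2.2.1 (pvBk results).2.2.2) [] = _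
  rw [pvRoundsB]
  rfl

-- ===== VERDICT (by name: the statement is the Claim_ definition above) =====
theorem rerank_for_diversity_py_spec : Claim_equal_rerank_for_diversity_py := by
  intro results _
  show rerank_for_diversity_py results = rerank_for_diversity_py_alt results
  rw [portA_eq, portB_eq]
  have hsum := pvBuckets_length results ([], [], [], [])
  exact pvRR_of_ge (pvBk results).1 (pvBk results).2.1 (pvBk results).2.2.1 (pvBk results).2.2.2
    _ rfl results.length (by unfold pvBk; simp at hsum ⊢; omega)
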